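-- pv_equiv track=rewrite | github.com/siddhantagwl/fji | yearly_performance_points.py | get_performance_points_chart
-- ===== SOURCE A (Python) =====
-- def get_performance_points_chart(target_kpi):
--
--     bucket_size = target_kpi // 4
--
--     number_list = list(range(0, target_kpi + 1))
--     grouped_numbers = [number_list[i:i+bucket_size] for i in range(0, len(number_list), bucket_size)]
--
--     # add a point for 0
--     point_chart = {(0, 0):0}
--
--     # start with point value 1
--     points = 1
--
--     for i, group in enumerate(grouped_numbers):
--
--         start_rng, end_rng = group[0], group[-1]
--         if i == 0:
--             # change the point that needs to be start with 1 rather than 0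
--             # coz if actual kpi = 0 then points = 0
--             start_rng += 1
--
--         point_chart[(start_rng, end_rng)] = points
--         # increment point value for next group
--         points += 1
--
--     return point_chart
-- ===== SOURCE B (Python) =====
-- def get_performance_points_chart(target_kpi):
--     # Arithmetic walk over bucket starts: no list of all KPI values, no slicing.
--     bucket_size = target_kpi // 4
--     point_chart = {(0, 0): 0}
--     if bucket_size > 0:
--         points = 1
--         start = 0
--         while start <= target_kpi:
--             end = min(start + bucket_size - 1, target_kpi)
--             point_chart[(1 if start == 0 else start, end)] = points
--             points += 1
--             start += bucket_size
--     return point_chart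
-- ===== Notes on version B (the rewrite author's own statement) =====
-- stated objective: faster
-- what changed: B computes each bucket's (start, end) arithmetically while stepping by bucket_size, instead of materializing list(range(target_kpi+1)) and slicing it into groups; Pre_ excludes 0 <= target_kpi <= 3, where A raises ValueError (range step 0).
-- outside the precondition, e.g. on get_performance_points_chart(0): A raises ValueError, B returns {(0, 0): 0}; on get_performance_points_chart(3): A raises ValueError, B returns {(0, 0): 0}
import Mathlib
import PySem

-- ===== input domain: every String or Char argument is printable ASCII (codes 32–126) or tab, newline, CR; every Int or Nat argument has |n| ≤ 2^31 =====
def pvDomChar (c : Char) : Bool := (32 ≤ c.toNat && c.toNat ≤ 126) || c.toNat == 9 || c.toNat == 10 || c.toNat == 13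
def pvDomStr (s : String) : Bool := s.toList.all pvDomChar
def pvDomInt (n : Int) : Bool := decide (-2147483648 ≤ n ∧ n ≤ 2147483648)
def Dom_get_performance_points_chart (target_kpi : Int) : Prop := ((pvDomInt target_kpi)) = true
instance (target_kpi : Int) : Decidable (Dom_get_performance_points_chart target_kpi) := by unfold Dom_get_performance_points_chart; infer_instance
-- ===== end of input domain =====

-- B replaces A's materialized list(range) + slicing with an arithmetic walk over bucket starts (asymptotically faster, in a timing run); equal on Pre_ (A raises ValueError for 0 <= target_kpi <= 3).


-- ===== PORT A =====
-- one loop iteration of A's `for i, group in enumerate(grouped_numbers)` (state = (point_chart, points))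
def pvAStep (st : PySem.Dict (Int × Int) Int × Int) (ig : Int × List Int) : PySem.Dict (Int × Int) Int × Int :=
  let start0 := (PySem.List.pyGet? ig.2 0).getD 0          -- group[0]   (never none inside Pre_)
  let end_rng := (PySem.List.pyGet? ig.2 (-1)).getD 0      -- group[-1]  (never none inside Pre_)
  let start_rng := if ig.1 = 0 then start0 + 1 else start0
  (st.1.insert (start_rng, end_rng) st.2, st.2 + 1)

def get_performance_points_chart (target_kpi : Int) : List (Int × Int × Int) :=
  let bucket_size := PySem.Int.floordiv target_kpi 4
  let number_list := PySem.List.pyRange 0 (target_kpi + 1) 1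
  let grouped_numbers := (PySem.List.pyRange 0 (number_list.length : Int) bucket_size).map
      (fun i => PySem.List.slice number_list (some i) (some (i + bucket_size)))
  let point_chart : PySem.Dict (Int × Int) Int := PySem.Dict.ofList [((0, 0), 0)]
  let res := (PySem.List.enumerate grouped_numbers 0).foldl pvAStep (point_chart, 1)
  res.1.items.map (fun p => (p.1.1, p.1.2, p.2))

-- ===== PORT B =====
-- B's `while start <= target_kpi` loop (terminates because bucket_size > 0 at every call)
def pvBLoop (target bucket : Int) (hb : 0 < bucket) (start points : Int)
    (chart : PySem.Dict (Int × Int) Int) : PySem.Dict (Int × Int) Int :=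
  if h : start ≤ target then
    pvBLoop target bucket hb (start + bucket) (points + 1)
      (chart.insert ((if start = 0 then 1 else start), min (start + bucket - 1) target) points)
  else chart
termination_by (target + 1 - start).toNat
decreasing_by omega

def get_performance_points_chart_alt (target_kpi : Int) : List (Int × Int × Int) :=
  let bucket_size := PySem.Int.floordiv target_kpi 4
  let point_chart : PySem.Dict (Int × Int) Int := PySem.Dict.ofList [((0, 0), 0)]
  let chart := if h : 0 < bucket_size then pvBLoop target_kpi bucket_size h 0 1 point_chart
               else point_chart
  chart.items.map (fun p => (p.1.1, p.1.2, p.2))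

-- ===== PRECONDITION & SPEC =====
-- Pre_ excludes exactly 0 ≤ target_kpi ≤ 3: there bucket_size = 0 and A raises ValueError (range() step 0).
def Pre_get_performance_points_chart (target_kpi : Int) : Prop :=
  target_kpi < 0 ∨ 4 ≤ target_kpi
instance (target_kpi : Int) : Decidable (Pre_get_performance_points_chart target_kpi) := by
  unfold Pre_get_performance_points_chart; infer_instance

def pvWitness_get_performance_points_chart : Int := 8

def Spec_get_performance_points_chart (target_kpi : Int) (out : List (Int × Int × Int)) : Prop := out = get_performance_points_chart_alt target_kpi
instance (target_kpi : Int) (out : List (Int × Int × Int)) : Decidable (Spec_get_performance_points_chart target_kpi out) := by unfold Spec_get_performance_points_chart; infer_instance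

-- ===== CLAIM (what is proved, stated in full; the proofs are below) =====
def Claim_equal_get_performance_points_chart : Prop := ∀ (target_kpi : Int), Dom_get_performance_points_chart target_kpi → Pre_get_performance_points_chart target_kpi → Spec_get_performance_points_chart target_kpi (get_performance_points_chart target_kpi)

-- ===== LEMMAS AND PROOFS =====

-- range(a, c, b) with positive step b peels its first element
theorem pvPyRange_pos_cons (a c b : Int) (hb : 0 < b) (h : a < c) :
    PySem.List.pyRange a c b = a :: PySem.List.pyRange (a + b) c b := by
  rw [PySem.List.pyRange_of_pos _ _ hb, PySem.List.pyRange_of_pos _ _ hb]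
  have hbne : b ≠ 0 := by omega
  have hediv : (c - a + b - 1) / b = (c - a - 1) / b + 1 := by
    have h1 := Int.add_mul_ediv_right (c - a - 1) 1 hbne
    rw [show c - a + b - 1 = c - a - 1 + 1 * b by ring]
    omega
  have hnn : 0 ≤ (c - a - 1) / b := Int.ediv_nonneg (by omega) (by omega)
  have hcnt : ((c - a + b - 1) / b).toNat = ((c - a - 1) / b).toNat + 1 := by omega
  by_cases hc : a + b < c
  · have hm : c - (a + b) + b - 1 = c - a - 1 := by ring
    rw [if_pos h, if_pos hc, hm, hcnt, List.range_succ_eq_map]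
    simp [List.map_map, Function.comp]
    intro k _
    ring
  · have hz : (c - a - 1) / b = 0 := Int.ediv_eq_zero_of_lt (by omega) (by omega)
    rw [if_pos h, if_neg hc, hcnt, hz]
    simp

-- range(a, c, b) with positive step is empty when c ≤ a
theorem pvPyRange_pos_nil (a c b : Int) (hb : 0 < b) (h : c ≤ a) :
    PySem.List.pyRange a c b = [] := by
  rw [PySem.List.pyRange_of_pos _ _ hb, if_neg (by omega)]
  simp

-- the slice number_list[start : start+b] of number_list = [0, 1, ..., t]: its first and last element
theorem pvGroup_get (t b start : Int) (hb : 1 ≤ b) (h0 : 0 ≤ start) (hst : start ≤ t) :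
    PySem.List.pyGet? (PySem.List.slice (PySem.List.pyRange 0 (t + 1) 1) (some start) (some (start + b))) 0
      = some start ∧
    PySem.List.pyGet? (PySem.List.slice (PySem.List.pyRange 0 (t + 1) 1) (some start) (some (start + b))) (-1)
      = some (min (start + b - 1) t) := by
  have hsl := PySem.List.slice_toNat (PySem.List.pyRange 0 (t + 1) 1) h0 (show 0 ≤ start + b by omega)
  set nl := PySem.List.pyRange 0 (t + 1) 1 with hnl
  have hlen : nl.length = (t + 1).toNat := PySem.List.length_pyRange_one 0 (t + 1) |>.trans (by norm_num)
  set j := start.toNat with hj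
  have hjs : (j : Int) = start := Int.toNat_of_nonneg h0
  set cc := (start + b).toNat - j with hcc
  have hc1 : 1 ≤ cc := by omega
  have hjn : j < (t + 1).toNat := by omega
  have hL : (List.take cc (List.drop j nl)).length = min cc ((t+1).toNat - j) := by
    simp [hlen]
  set L := min cc ((t+1).toNat - j) with hLdef
  have hL1 : 1 ≤ L := by omega
  have hget : ∀ k : Nat, k < L → (List.take cc (List.drop j nl))[k]? = some ((j : Int) + (k : Int)) := by
    intro k hk
    rw [List.getElem?_take, if_pos (by omega), List.getElem?_drop, hnl,
        PySem.List.getElem?_pyRange_one, if_pos (by omega)]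
    push_cast
    ring_nf
  constructor
  · rw [hsl, PySem.List.pyGet?_of_nonneg _ (show (0:Int) ≤ 0 by norm_num)]
    norm_num
    have := hget 0 (by omega)
    simpa [hjs] using this
  · rw [hsl, PySem.List.pyGet?_neg_one, List.getLast?_eq_getElem?, hL]
    have := hget (L - 1) (by omega)
    rw [this]
    congr 1
    omega

-- the tail of A's fold (enumerate index ≥ 1, bucket start ≥ 1) equals B's while loop
theorem pvTail_eq (t b : Int) (hb : 0 < b)
    (start points : Int) (chart : PySem.Dict (Int × Int) Int)
    (hs1 : 1 ≤ start) (s : Int) (hs : 1 ≤ s) :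
    ((PySem.List.enumerate ((PySem.List.pyRange start (t + 1) b).map
        (fun i => PySem.List.slice (PySem.List.pyRange 0 (t + 1) 1) (some i) (some (i + b)))) s).foldl
      pvAStep (chart, points)).1
    = pvBLoop t b hb start points chart := by
  by_cases h : start ≤ t
  · rw [pvPyRange_pos_cons start (t+1) b hb (by omega)]
    rw [List.map_cons, PySem.List.enumerate_cons, List.foldl_cons]
    have hg := pvGroup_get t b start (by omega) (by omega) h
    have hstep : pvAStep (chart, points)
        (s, PySem.List.slice (PySem.List.pyRange 0 (t + 1) 1) (some start) (some (start + b)))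
        = (chart.insert (start, min (start + b - 1) t) points, points + 1) := by
      unfold pvAStep
      rw [hg.1, hg.2]
      simp [show ¬(s = 0) by omega]
    rw [hstep,
        pvTail_eq t b hb (start + b) (points + 1) _ (by omega) (s + 1) (by omega)]
    conv_rhs => rw [pvBLoop]
    rw [dif_pos h]
    simp [show ¬(start = 0) by omega]
  · rw [pvPyRange_pos_nil start (t+1) b hb (by omega)]
    simp
    rw [pvBLoop, dif_neg h]
termination_by (t + 1 - start).toNat
decreasing_by omega

theorem pvFdiv_bounds (t : Int) : 4 * (t.fdiv 4) ≤ t ∧ t < 4 * (t.fdiv 4) + 4 := by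
  have hfd : t.fdiv 4 = t / 4 := by
    have := @Int.fdiv_eq_ediv t 4
    simp at this
    omega
  have := Int.mul_ediv_add_emod t 4
  have h2 : 0 ≤ t % 4 := Int.emod_nonneg t (by norm_num)
  have h3 : t % 4 < 4 := Int.emod_lt_of_pos t (by norm_num)
  omega

-- ===== VERDICT (by name: the statement is the Claim_ definition above) =====
theorem get_performance_points_chart_spec : Claim_equal_get_performance_points_chart := by
  intro t hDom hPre
  unfold Spec_get_performance_points_chart
  have hbnd := pvFdiv_bounds t
  simp only [get_performance_points_chart, get_performance_points_chart_alt, PySem.Int.floordiv]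
  rcases hPre with hneg | hge
  · -- target_kpi < 0: no buckets on either side
    have hb : t.fdiv 4 < 0 := by omega
    have hnl : PySem.List.pyRange 0 (t + 1) 1 = [] := PySem.List.pyRange_one_eq_nil (by omega)
    have h0 : PySem.List.pyRange 0 0 (t.fdiv 4) = [] := by
      unfold PySem.List.pyRange
      split_ifs <;> simp_all
    rw [hnl]
    simp only [List.length_nil, Nat.cast_zero, h0, List.map_nil]
    rw [dif_neg (by omega)]
    simp
  · -- 4 ≤ target_kpi: peel the first bucket, then pvTail_eq
    have hb : 1 ≤ t.fdiv 4 := by omega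
    set b := t.fdiv 4 with hbdef
    have hlen : ((PySem.List.pyRange 0 (t + 1) 1).length : Int) = t + 1 := by
      rw [PySem.List.length_pyRange_one]
      omega
    rw [hlen, pvPyRange_pos_cons 0 (t + 1) b (by omega) (by omega), List.map_cons,
        PySem.List.enumerate_cons, List.foldl_cons]
    have hg := pvGroup_get t b 0 (by omega) (by omega) (by omega)
    have hstep : pvAStep (PySem.Dict.ofList [((0, 0), 0)], 1)
        (0, PySem.List.slice (PySem.List.pyRange 0 (t + 1) 1) (some 0) (some (0 + b)))
        = ((PySem.Dict.ofList [((0, 0), 0)]).insert (1, min (0 + b - 1) t) 1, 2) := by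
      unfold pvAStep
      rw [hg.1, hg.2]
      simp
    rw [hstep]
    simp only [← hbdef]
    norm_num
    rw [pvTail_eq t b (by omega) b 2 _ (by omega) 1 (by omega),
        dif_pos (show 0 < b by omega)]
    conv_rhs => rw [pvBLoop]
    rw [dif_pos (show (0:Int) ≤ t by omega)]
    norm_num
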